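-- pv_equiv track=rewrite | github.com/alpasult/blackjackbot | main.py | get_wins_loses
-- ===== SOURCE A (Python) =====
-- import copy
--
-- def hand_value(c_hand):
--     value = 0
--     aces = 0
--     for card in c_hand:
--         if card[0] == 11 or card[0] == 12 or card[0] == 13:
--             value += 10
--         elif card[0] == 1:
--             aces += 1
--         else:
--             value += card[0]
--     if aces > 0:
--         if value + 11 + aces - 1 <= 21:
--             value += 11 + aces - 1
--         else:
--             value += aces
--     return value
--
-- def get_wins_loses(dc_hand, pc_hand, c_deck):
--     wins = 0
--     loses = 0
--     for card in c_deck: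
--         td_hand = copy.copy(dc_hand)
--         td_hand.append(card)
--         t_deck = copy.copy(c_deck)
--         t_deck.remove(card)
--         d_value = hand_value(td_hand)
--         if d_value < 17:
--             wins_loses = get_wins_loses(td_hand, pc_hand, t_deck)
--             wins += wins_loses[0]
--             loses += wins_loses[1]
--         elif d_value > 21 or d_value < hand_value(pc_hand):
--             wins += 1
--         else:
--             loses += 1
--     return [wins, loses]
-- ===== SOURCE B (Python) =====
-- def _adjust(v, a):
--     if a > 0:
--         return v + 11 + a - 1 if v + 11 + a - 1 <= 21 else v + a
--     return v
--
-- def _acc(hand):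
--     v = 0
--     a = 0
--     for card in hand:
--         r = card[0]
--         if r == 11 or r == 12 or r == 13:
--             v += 10
--         elif r == 1:
--             a += 1
--         else:
--             v += r
--     return v, a
--
-- def get_wins_loses(dc_hand, pc_hand, c_deck):
--     pv_v, pv_a = _acc(pc_hand)
--     pv = _adjust(pv_v, pv_a)
--     v0, a0 = _acc(dc_hand)
--     cnt = {}
--     for card in c_deck:
--         cnt[card[0]] = cnt.get(card[0], 0) + 1
--
--     def go(v, a, cnt):
--         wins = 0
--         loses = 0
--         for r, c in cnt.items():
--             if c == 0:
--                 continue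
--             if r == 11 or r == 12 or r == 13:
--                 nv, na = v + 10, a
--             elif r == 1:
--                 nv, na = v, a + 1
--             else:
--                 nv, na = v + r, a
--             d = _adjust(nv, na)
--             if d < 17:
--                 c2 = dict(cnt)
--                 c2[r] = c - 1
--                 sw, sl = go(nv, na, c2)
--                 wins += c * sw
--                 loses += c * sl
--             elif d > 21 or d < pv:
--                 wins += c
--             else:
--                 loses += c
--         return [wins, loses]
--
--     return go(v0, a0, cnt)
-- ===== Notes on version B (the rewrite author's own statement) =====
-- stated objective: faster
-- what changed: B replaces A's per-card recursion over the deck list with a recursion on (dealer value, ace count, rank->count table): the table is built once, equal-rank cards are explored as one branch multiplied by their multiplicity, and the player's hand value is computed once instead of at every leaf.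
import Mathlib
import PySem

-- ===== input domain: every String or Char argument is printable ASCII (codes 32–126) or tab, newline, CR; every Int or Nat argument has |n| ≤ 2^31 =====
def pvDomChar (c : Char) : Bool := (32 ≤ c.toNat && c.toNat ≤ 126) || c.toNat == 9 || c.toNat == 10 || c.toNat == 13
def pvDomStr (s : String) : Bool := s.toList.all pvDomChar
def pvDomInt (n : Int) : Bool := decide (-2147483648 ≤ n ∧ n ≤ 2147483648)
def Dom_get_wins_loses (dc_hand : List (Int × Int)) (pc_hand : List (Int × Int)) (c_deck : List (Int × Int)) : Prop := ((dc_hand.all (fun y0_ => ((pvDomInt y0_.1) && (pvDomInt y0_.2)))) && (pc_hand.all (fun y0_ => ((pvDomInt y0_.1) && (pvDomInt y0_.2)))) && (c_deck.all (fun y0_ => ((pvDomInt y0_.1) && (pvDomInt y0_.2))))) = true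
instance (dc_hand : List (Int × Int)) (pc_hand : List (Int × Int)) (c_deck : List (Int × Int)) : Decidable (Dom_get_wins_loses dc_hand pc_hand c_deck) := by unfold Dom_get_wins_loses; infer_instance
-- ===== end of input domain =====

-- B groups equal-rank cards into a rank→count table built once and recurses on (dealer value, aces, table),
-- multiplying each branch by its multiplicity, instead of branching on every individual card; same return value.

-- ===== PORT A =====
-- literal port of A's helper: value/aces accumulated in a loop, then the ace adjustment
def hand_value (c_hand : List (Int × Int)) : Int :=
  let va := c_hand.foldl (fun (s : Int × Int) card =>
    if card.1 = 11 ∨ card.1 = 12 ∨ card.1 = 13 then (s.1 + 10, s.2)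
    else if card.1 = 1 then (s.1, s.2 + 1)
    else (s.1 + card.1, s.2)) (0, 0)
  if va.2 > 0 then
    (if va.1 + 11 + va.2 - 1 ≤ 21 then va.1 + 11 + va.2 - 1 else va.1 + va.2)
  else va.1

-- A's recursion, made total with fuel = |deck| (each recursive call removes one card, so the fuel never runs out)
def gwlAux : Nat → List (Int × Int) → List (Int × Int) → List (Int × Int) → List Int
  | 0, _, _, _ => [0, 0]
  | n + 1, dc_hand, pc_hand, c_deck =>
    let wl := c_deck.foldl (fun (s : Int × Int) card =>
      let td_hand := dc_hand ++ [card]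
      -- t_deck = copy of c_deck with the first occurrence of card removed; card ∈ c_deck, so remove? never fails
      let t_deck := (PySem.List.remove? c_deck card).getD c_deck
      let d_value := hand_value td_hand
      if d_value < 17 then
        let sub := gwlAux n td_hand pc_hand t_deck
        (s.1 + PySem.List.pyGetD sub 0 0, s.2 + PySem.List.pyGetD sub 1 0)
      else if d_value > 21 ∨ d_value < hand_value pc_hand then (s.1 + 1, s.2)
      else (s.1, s.2 + 1)) (0, 0)
    [wl.1, wl.2]

def get_wins_loses (dc_hand : List (Int × Int)) (pc_hand : List (Int × Int)) (c_deck : List (Int × Int)) : List Int :=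
  gwlAux c_deck.length dc_hand pc_hand c_deck

-- ===== PORT B =====
def bAdjust (v a : Int) : Int :=
  if a > 0 then (if v + 11 + a - 1 ≤ 21 then v + 11 + a - 1 else v + a) else v

def bAcc (hand : List (Int × Int)) : Int × Int :=
  hand.foldl (fun (s : Int × Int) card =>
    if card.1 = 11 ∨ card.1 = 12 ∨ card.1 = 13 then (s.1 + 10, s.2)
    else if card.1 = 1 then (s.1, s.2 + 1)
    else (s.1 + card.1, s.2)) (0, 0)

-- Source B's inner `go`, made total with fuel = |deck| (each recursive call lowers the total count by one)
def bGo (pv : Int) : Nat → Int → Int → PySem.Dict Int Int → List Int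
  | 0, _, _, _ => [0, 0]
  | n + 1, v, a, cnt =>
    let wl := cnt.items.foldl (fun (s : Int × Int) rc =>
      if rc.2 = 0 then s
      else
        let nva := if rc.1 = 11 ∨ rc.1 = 12 ∨ rc.1 = 13 then (v + 10, a)
          else if rc.1 = 1 then (v, a + 1) else (v + rc.1, a)
        let d := bAdjust nva.1 nva.2
        if d < 17 then
          let sub := bGo pv n nva.1 nva.2 (cnt.insert rc.1 (rc.2 - 1))
          (s.1 + rc.2 * PySem.List.pyGetD sub 0 0, s.2 + rc.2 * PySem.List.pyGetD sub 1 0)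
        else if d > 21 ∨ d < pv then (s.1 + rc.2, s.2)
        else (s.1, s.2 + rc.2)) (0, 0)
    [wl.1, wl.2]

def get_wins_loses_alt (dc_hand : List (Int × Int)) (pc_hand : List (Int × Int)) (c_deck : List (Int × Int)) : List Int :=
  let pva := bAcc pc_hand
  let pv := bAdjust pva.1 pva.2
  let va0 := bAcc dc_hand
  let cnt := c_deck.foldl (fun (d : PySem.Dict Int Int) card => d.insert card.1 (d.getD card.1 0 + 1)) PySem.Dict.empty
  bGo pv c_deck.length va0.1 va0.2 cnt

-- ===== PRECONDITION & SPEC =====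
def Spec_get_wins_loses (dc_hand : List (Int × Int)) (pc_hand : List (Int × Int)) (c_deck : List (Int × Int)) (out : List Int) : Prop := out = get_wins_loses_alt dc_hand pc_hand c_deck
instance (dc_hand : List (Int × Int)) (pc_hand : List (Int × Int)) (c_deck : List (Int × Int)) (out : List Int) : Decidable (Spec_get_wins_loses dc_hand pc_hand c_deck out) := by unfold Spec_get_wins_loses; infer_instance

-- ===== CLAIM (what is proved, stated in full; the proofs are below) =====
def Claim_equal_get_wins_loses : Prop := ∀ (dc_hand : List (Int × Int)) (pc_hand : List (Int × Int)) (c_deck : List (Int × Int)), Dom_get_wins_loses dc_hand pc_hand c_deck → Spec_get_wins_loses dc_hand pc_hand c_deck (get_wins_loses dc_hand pc_hand c_deck)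

-- ===== LEMMAS AND PROOFS =====

-- (v, aces) update for one drawn rank — the common abstraction of both programs' per-card step
def stepVA (v a r : Int) : Int × Int :=
  if r = 11 ∨ r = 12 ∨ r = 13 then (v + 10, a) else if r = 1 then (v, a + 1) else (v + r, a)

-- canonical (wins, loses) on the MULTISET of remaining ranks: both ports are proved equal to this
def cwl (pv : Int) : Nat → Int → Int → Multiset Int → Int × Int
  | 0, _, _, _ => (0, 0)
  | n + 1, v, a, m =>
    (m.map (fun r =>
      let nva := stepVA v a r
      let d := bAdjust nva.1 nva.2
      if d < 17 then cwl pv n nva.1 nva.2 (m.erase r)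
      else if d > 21 ∨ d < pv then ((1 : Int), (0 : Int))
      else (0, 1))).sum

-- the multiset of ranks a (rank, count) association list represents
def mOfL (l : List (Int × Int)) : Multiset Int :=
  (l.map (fun rc => Multiset.replicate rc.2.toNat rc.1)).sum

theorem hand_value_eq (h : List (Int × Int)) : hand_value h = bAdjust (bAcc h).1 (bAcc h).2 := rfl

theorem bAcc_append (h : List (Int × Int)) (c : Int × Int) :
    bAcc (h ++ [c]) = stepVA (bAcc h).1 (bAcc h).2 c.1 := by
  simp only [bAcc, List.foldl_append, List.foldl_cons, List.foldl_nil, stepVA]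

theorem foldl_add_prod {β : Type} (g : β → Int × Int) (l : List β) (init : Int × Int) :
    l.foldl (fun s c => s + g c) init = init + (l.map g).sum := by
  induction l generalizing init with
  | nil => simp
  | cons x xs ih => simp [List.foldl_cons, ih, add_assoc]

theorem map_fst_erase (m : Multiset (Int × Int)) (c : Int × Int) (h : c ∈ m) :
    (m.erase c).map Prod.fst = (m.map Prod.fst).erase c.1 := by
  conv_rhs => rw [← Multiset.cons_erase h]
  simp [Multiset.map_cons, Multiset.erase_cons_head]

theorem erase_beq_eq (deck : List (Int × Int)) (card : Int × Int) :
    @List.erase _ instBEqProd deck card = @List.erase _ instBEqOfDecidableEq deck card := by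
  induction deck with
  | nil => rfl
  | cons p ps ih => simp [List.erase_cons, beq_iff_eq, ih]

-- A-side: gwlAux computes cwl on the rank multiset of the deck
theorem A_eq_C (n : Nat) (dc pc deck : List (Int × Int)) :
    gwlAux n dc pc deck =
      [(cwl (hand_value pc) n (bAcc dc).1 (bAcc dc).2 (↑(deck.map Prod.fst) : Multiset Int)).1,
       (cwl (hand_value pc) n (bAcc dc).1 (bAcc dc).2 (↑(deck.map Prod.fst) : Multiset Int)).2] := by
  induction n generalizing dc deck with
  | zero => simp [gwlAux, cwl]
  | succ n ih =>
    have hg :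
        deck.foldl (fun (s : Int × Int) card =>
          let td_hand := dc ++ [card]
          let t_deck := (PySem.List.remove? deck card).getD deck
          let d_value := hand_value td_hand
          if d_value < 17 then
            let sub := gwlAux n td_hand pc t_deck
            (s.1 + PySem.List.pyGetD sub 0 0, s.2 + PySem.List.pyGetD sub 1 0)
          else if d_value > 21 ∨ d_value < hand_value pc then (s.1 + 1, s.2)
          else (s.1, s.2 + 1)) (0, 0)
        = (0, 0) + (deck.map (fun card =>
            let d_value := hand_value (dc ++ [card])
            if d_value < 17 then
              let sub := gwlAux n (dc ++ [card]) pc ((PySem.List.remove? deck card).getD deck)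
              ((PySem.List.pyGetD sub 0 0 : Int), (PySem.List.pyGetD sub 1 0 : Int))
            else if d_value > 21 ∨ d_value < hand_value pc then ((1:Int), (0:Int))
            else (0, 1))).sum := by
      rw [← foldl_add_prod]
      congr 1
      funext s card
      simp only []
      split_ifs <;> exact Prod.ext (by simp) (by simp)
    simp only [gwlAux, hg]
    have hmap : deck.map (fun card =>
            let d_value := hand_value (dc ++ [card])
            if d_value < 17 then
              let sub := gwlAux n (dc ++ [card]) pc ((PySem.List.remove? deck card).getD deck)
              ((PySem.List.pyGetD sub 0 0 : Int), (PySem.List.pyGetD sub 1 0 : Int))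
            else if d_value > 21 ∨ d_value < hand_value pc then ((1:Int), (0:Int))
            else (0, 1))
        = deck.map (fun card =>
            (fun r =>
              let nva := stepVA (bAcc dc).1 (bAcc dc).2 r
              let d := bAdjust nva.1 nva.2
              if d < 17 then
                cwl (hand_value pc) n nva.1 nva.2 ((↑(deck.map Prod.fst) : Multiset Int).erase r)
              else if d > 21 ∨ d < hand_value pc then ((1 : Int), (0 : Int))
              else (0, 1)) card.1) := by
      refine List.map_congr_left (fun card hcard => ?_)
      have hrm : (PySem.List.remove? deck card).getD deck = deck.erase card := by
        rw [PySem.List.remove?_eq_some_erase deck card hcard]; rfl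
      have hhv : hand_value (dc ++ [card])
          = bAdjust (stepVA (bAcc dc).1 (bAcc dc).2 card.1).1 (stepVA (bAcc dc).1 (bAcc dc).2 card.1).2 := by
        rw [hand_value_eq, bAcc_append]
      have herase : (↑((deck.erase card).map Prod.fst) : Multiset Int)
          = (↑(deck.map Prod.fst) : Multiset Int).erase card.1 := by
        have hcoe : (↑(deck.erase card) : Multiset (Int × Int)) = (↑deck : Multiset (Int × Int)).erase card :=
          by rw [erase_beq_eq]; exact (Multiset.coe_erase deck card).symm
        rw [← Multiset.map_coe, hcoe,
          map_fst_erase _ _ (Multiset.mem_coe.2 hcard), Multiset.map_coe]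
      simp only [hrm, hhv, ih, bAcc_append, ← herase]
      split_ifs <;> rfl
    rw [hmap, Prod.mk_zero_zero, zero_add]
    have hcwl : cwl (hand_value pc) (n+1) (bAcc dc).1 (bAcc dc).2 (↑(deck.map Prod.fst) : Multiset Int)
        = ((↑(deck.map Prod.fst) : Multiset Int).map (fun r =>
              let nva := stepVA (bAcc dc).1 (bAcc dc).2 r
              let d := bAdjust nva.1 nva.2
              if d < 17 then
                cwl (hand_value pc) n nva.1 nva.2 ((↑(deck.map Prod.fst) : Multiset Int).erase r)
              else if d > 21 ∨ d < hand_value pc then ((1 : Int), (0 : Int))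
              else (0, 1))).sum := rfl
    rw [hcwl, Multiset.map_coe, Multiset.sum_coe, List.map_map]
    rfl

theorem count_mOfL (l : List (Int × Int)) (x : Int) :
    (mOfL l).count x = ((l.filter (fun p => p.1 = x)).map (fun p => p.2.toNat)).sum := by
  induction l with
  | nil => simp [mOfL]
  | cons p ps ih =>
    by_cases hp : p.1 = x <;> simp [mOfL, hp, Multiset.count_replicate] <;> simp [mOfL] at ih <;> simp [ih]

theorem filter_key_of_not_mem (l : List (Int × Int)) (x : Int) (h : x ∉ l.map Prod.fst) :
    l.filter (fun p => p.1 = x) = [] := by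
  induction l with
  | nil => rfl
  | cons p ps ih =>
    simp only [List.map_cons, List.mem_cons, not_or] at h
    simp [Ne.symm h.1, ih h.2]

theorem filter_key_of_mem (l : List (Int × Int)) (hnd : (l.map Prod.fst).Nodup)
    (x v : Int) (h : (x, v) ∈ l) : l.filter (fun p => p.1 = x) = [(x, v)] := by
  induction l with
  | nil => simp at h
  | cons p ps ih =>
    simp only [List.map_cons, List.nodup_cons] at hnd
    rcases List.mem_cons.1 h with rfl | hmem
    · simpa using filter_key_of_not_mem ps x hnd.1
    · have hne : p.1 ≠ x := by
        intro e; exact hnd.1 (e ▸ (List.mem_map.2 ⟨_, hmem, rfl⟩))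
      simp [hne, ih hnd.2 hmem]

theorem map_fst_replace (l : List (Int × Int)) (r c' : Int) :
    (l.map (fun p => if p.1 == r then (r, c') else p)).map Prod.fst = l.map Prod.fst := by
  rw [List.map_map]
  refine List.map_congr_left (fun p _ => ?_)
  by_cases h : p.1 = r <;> simp [h]

theorem mOf_insert (cnt : PySem.Dict Int Int) (hnd : cnt.keys.Nodup)
    (rc : Int × Int) (h : rc ∈ cnt.items) :
    mOfL (cnt.insert rc.1 (rc.2 - 1)).items = (mOfL cnt.items).erase rc.1 := by
  have hkeys : cnt.keys = cnt.items.map Prod.fst := rfl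
  have hcont : cnt.contains rc.1 = true := by
    rw [PySem.Dict.contains_iff_mem_keys, hkeys]
    exact List.mem_map.2 ⟨rc, h, rfl⟩
  rw [PySem.Dict.items_insert_of_contains _ _ hcont]
  have hnd' : (cnt.items.map Prod.fst).Nodup := hkeys ▸ hnd
  have hndR : ((cnt.items.map (fun p => if p.1 == rc.1 then (rc.1, rc.2 - 1) else p)).map Prod.fst).Nodup := by
    rw [map_fst_replace]; exact hnd'
  have hmemR : (rc.1, rc.2 - 1) ∈ cnt.items.map (fun p => if p.1 == rc.1 then (rc.1, rc.2 - 1) else p) :=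
    List.mem_map.2 ⟨rc, h, by simp⟩
  refine Multiset.ext.2 (fun x => ?_)
  by_cases hx : x = rc.1
  · subst hx
    rw [Multiset.count_erase_self, count_mOfL, count_mOfL,
      filter_key_of_mem _ hndR rc.1 (rc.2 - 1) hmemR,
      filter_key_of_mem _ hnd' rc.1 rc.2 (by simpa using h)]
    simp
  · rw [Multiset.count_erase_of_ne hx, count_mOfL, count_mOfL]
    by_cases hk : x ∈ cnt.items.map Prod.fst
    · obtain ⟨p, hp, hpx⟩ := List.mem_map.1 hk
      have hpne : p.1 ≠ rc.1 := by rw [hpx]; exact hx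
      have h1 : (x, p.2) ∈ cnt.items := by rw [← hpx]; simpa using hp
      have h2 : (x, p.2) ∈ cnt.items.map (fun q => if q.1 == rc.1 then (rc.1, rc.2 - 1) else q) :=
        List.mem_map.2 ⟨p, hp, by simp [hpne]; rw [← hpx]⟩
      rw [filter_key_of_mem _ hndR x p.2 h2, filter_key_of_mem _ hnd' x p.2 h1]
    · rw [filter_key_of_not_mem _ _ (by rwa [map_fst_replace]), filter_key_of_not_mem _ _ hk]

theorem mOf_counter (xs : List Int) : mOfL (PySem.Dict.counter xs).items = (↑xs : Multiset Int) := by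
  have hnd : ((PySem.Dict.counter xs).items.map Prod.fst).Nodup := PySem.Dict.nodup_keys_counter xs
  refine Multiset.ext.2 (fun x => ?_)
  rw [count_mOfL, Multiset.coe_count]
  by_cases hx : x ∈ xs
  · have hcont : (PySem.Dict.counter xs).contains x = true := by
      simp [PySem.Dict.contains_counter, hx]
    obtain ⟨v, hv⟩ := Option.ne_none_iff_exists'.1 (by
      rw [Ne, PySem.Dict.get?_eq_none_iff_contains]; simp [hcont] :
      (PySem.Dict.counter xs).get? x ≠ none)
    have hmem := PySem.Dict.mem_items_of_get?_eq_some _ hv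
    have hval : v = (xs.count x : Int) := by
      have := PySem.Dict.getD_of_mem_items _ hmem (PySem.Dict.nodup_keys_counter xs) 0
      rw [PySem.Dict.getD_counter] at this; omega
    rw [filter_key_of_mem _ hnd x v hmem]
    simp [hval]
  · have : x ∉ (PySem.Dict.counter xs).items.map Prod.fst := by
      intro hmem
      have hc2 : (PySem.Dict.counter xs).contains x = true :=
        (PySem.Dict.contains_iff_mem_keys _ _).2 hmem
      rw [PySem.Dict.contains_counter] at hc2
      exact hx (by simpa using hc2)
    rw [filter_key_of_not_mem _ _ this]
    simp [List.count_eq_zero_of_not_mem hx]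

theorem map_sum_mOfL (l : List (Int × Int)) (f : Int → Int × Int) :
    ((mOfL l).map f).sum = (l.map (fun rc => rc.2.toNat • f rc.1)).sum := by
  induction l with
  | nil => simp [mOfL]
  | cons p ps ih =>
    simp [mOfL, Multiset.map_replicate, Multiset.sum_replicate] at ih ⊢
    rw [ih]

-- B-side: bGo computes cwl on the multiset its count table represents
theorem B_eq_C (n : Nat) (pv : Int) (v a : Int) (cnt : PySem.Dict Int Int)
    (hnd : cnt.keys.Nodup) (hpos : ∀ p ∈ cnt.items, 0 ≤ p.2) :
    bGo pv n v a cnt = [(cwl pv n v a (mOfL cnt.items)).1, (cwl pv n v a (mOfL cnt.items)).2] := by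
  induction n generalizing v a cnt with
  | zero => simp [bGo, cwl]
  | succ n ih =>
    have hg :
        cnt.items.foldl (fun (s : Int × Int) rc =>
          if rc.2 = 0 then s
          else
            let nva := if rc.1 = 11 ∨ rc.1 = 12 ∨ rc.1 = 13 then (v + 10, a)
              else if rc.1 = 1 then (v, a + 1) else (v + rc.1, a)
            let d := bAdjust nva.1 nva.2
            if d < 17 then
              let sub := bGo pv n nva.1 nva.2 (cnt.insert rc.1 (rc.2 - 1))
              (s.1 + rc.2 * PySem.List.pyGetD sub 0 0, s.2 + rc.2 * PySem.List.pyGetD sub 1 0)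
            else if d > 21 ∨ d < pv then (s.1 + rc.2, s.2)
            else (s.1, s.2 + rc.2)) (0, 0)
        = (0, 0) + (cnt.items.map (fun rc =>
            if rc.2 = 0 then ((0 : Int), (0 : Int))
            else
              let nva := stepVA v a rc.1
              let d := bAdjust nva.1 nva.2
              if d < 17 then
                let sub := bGo pv n nva.1 nva.2 (cnt.insert rc.1 (rc.2 - 1))
                ((rc.2 * PySem.List.pyGetD sub 0 0 : Int), (rc.2 * PySem.List.pyGetD sub 1 0 : Int))
              else if d > 21 ∨ d < pv then (rc.2, (0 : Int))
              else ((0 : Int), rc.2))).sum := by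
      rw [← foldl_add_prod]
      congr 1
      funext s rc
      simp only [stepVA]
      split_ifs <;> exact Prod.ext (by simp) (by simp)
    simp only [bGo, hg]
    have hmap : cnt.items.map (fun rc =>
            if rc.2 = 0 then ((0 : Int), (0 : Int))
            else
              let nva := stepVA v a rc.1
              let d := bAdjust nva.1 nva.2
              if d < 17 then
                let sub := bGo pv n nva.1 nva.2 (cnt.insert rc.1 (rc.2 - 1))
                ((rc.2 * PySem.List.pyGetD sub 0 0 : Int), (rc.2 * PySem.List.pyGetD sub 1 0 : Int))
              else if d > 21 ∨ d < pv then (rc.2, (0 : Int))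
              else ((0 : Int), rc.2))
        = cnt.items.map (fun rc => rc.2.toNat •
            (fun r =>
              let nva := stepVA v a r
              let d := bAdjust nva.1 nva.2
              if d < 17 then cwl pv n nva.1 nva.2 ((mOfL cnt.items).erase r)
              else if d > 21 ∨ d < pv then ((1 : Int), (0 : Int))
              else (0, 1)) rc.1) := by
      refine List.map_congr_left (fun rc hrc => ?_)
      by_cases h0 : rc.2 = 0
      · simp [h0]
      · have hposrc : 0 < rc.2 := lt_of_le_of_ne (hpos rc hrc) (Ne.symm h0)
        have hndi : (cnt.insert rc.1 (rc.2 - 1)).keys.Nodup :=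
          PySem.Dict.nodup_keys_insert _ _ _ hnd
        have hposi : ∀ p ∈ (cnt.insert rc.1 (rc.2 - 1)).items, 0 ≤ p.2 := by
          intro p hp
          rcases (PySem.Dict.mem_items_insert _ _ _ _).1 hp with rfl | ⟨hp', _⟩
          · simp; omega
          · exact hpos p hp'
        have hsub := ih (stepVA v a rc.1).1 (stepVA v a rc.1).2 (cnt.insert rc.1 (rc.2 - 1)) hndi hposi
        rw [mOf_insert cnt hnd rc hrc] at hsub
        have htn : ((rc.2.toNat : Nat) : Int) = rc.2 := Int.toNat_of_nonneg (le_of_lt hposrc)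
        simp only [if_neg h0, hsub]
        split_ifs <;>
          exact Prod.ext (by simp [htn, PySem.List.pyGetD]) (by simp [htn, PySem.List.pyGetD])
    rw [hmap, Prod.mk_zero_zero, zero_add]
    have hcwl : cwl pv (n+1) v a (mOfL cnt.items)
        = ((mOfL cnt.items).map (fun r =>
              let nva := stepVA v a r
              let d := bAdjust nva.1 nva.2
              if d < 17 then cwl pv n nva.1 nva.2 ((mOfL cnt.items).erase r)
              else if d > 21 ∨ d < pv then ((1 : Int), (0 : Int))
              else (0, 1))).sum := rfl
    rw [hcwl, map_sum_mOfL]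

-- ===== VERDICT (by name: the statement is the Claim_ definition above) =====
theorem get_wins_loses_spec : Claim_equal_get_wins_loses := by
  intro dc_hand pc_hand c_deck _
  unfold Spec_get_wins_loses
  have hcnt : c_deck.foldl (fun (d : PySem.Dict Int Int) card => d.insert card.1 (d.getD card.1 0 + 1)) PySem.Dict.empty
      = PySem.Dict.counter (c_deck.map Prod.fst) := by
    rw [← PySem.Dict.foldl_insert_getD_add_one_eq_counter, List.foldl_map]
  have hpos : ∀ p ∈ (PySem.Dict.counter (c_deck.map Prod.fst)).items, 0 ≤ p.2 := by
    intro p hp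
    have hval := PySem.Dict.getD_of_mem_items _ (k := p.1) (v := p.2) (by simpa using hp)
      (PySem.Dict.nodup_keys_counter _) 0
    rw [PySem.Dict.getD_counter] at hval
    omega
  rw [get_wins_loses, get_wins_loses_alt, A_eq_C]
  simp only [hcnt]
  rw [B_eq_C _ _ _ _ _ (PySem.Dict.nodup_keys_counter _) hpos, mOf_counter, ← hand_value_eq]
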